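-- pv_equiv track=rewrite | github.com/abdanhafidz/college-1st-sem | daspro/fp/countingblob.py | blobbing
-- ===== SOURCE A (Python) =====
-- def blobbing(A, n):
--
--     res = 0
--     curr = 1
--     for i in range (n - 1) :
--         if (A[i + 1] < A[i]):
--             curr += 1
--         else :
--             res += (((curr - 1) * curr) // 2);
--             curr = 1
--     if (curr > 1):
--         res += (((curr - 1) * curr) // 2)
--     return res
-- ===== SOURCE B (Python) =====
-- def blobbing(A, n):
--     prefix = A[:n] if n > 0 else []
--     res = 0
--     streak = 0
--     for prev, cur in zip(prefix, prefix[1:]):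
--         streak = streak + 1 if cur < prev else 0
--         res += streak
--     return res
-- ===== Notes on version B (the rewrite author's own statement) =====
-- stated objective: alternative
-- what changed: B first materialises the prefix A[:n] as a list and zips it with its own tail, folding an incremental streak counter (adding 1+2+...+(L-1)=C(L,2) term by term) over the adjacent pairs, instead of A's index loop over range(n-1) with a run-length counter that is flushed as a triangular number at each run boundary and again after the loop.
import Mathlib
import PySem

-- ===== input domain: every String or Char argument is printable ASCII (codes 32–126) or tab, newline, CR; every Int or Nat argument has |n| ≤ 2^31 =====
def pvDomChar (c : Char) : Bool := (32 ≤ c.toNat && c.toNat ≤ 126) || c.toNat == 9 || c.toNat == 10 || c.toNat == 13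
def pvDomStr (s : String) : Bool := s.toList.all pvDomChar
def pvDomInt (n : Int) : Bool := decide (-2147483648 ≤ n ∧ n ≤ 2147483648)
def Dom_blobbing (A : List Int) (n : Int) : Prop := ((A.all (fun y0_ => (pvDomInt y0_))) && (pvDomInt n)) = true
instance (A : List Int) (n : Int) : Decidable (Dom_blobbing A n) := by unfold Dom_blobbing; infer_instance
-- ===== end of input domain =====

-- B materialises the prefix A[:n] and folds an incremental streak counter over its list
-- of adjacent pairs (zip with the tail), replacing A's index loop with run-length counter
-- and triangular-number flushes; same O(n) cost, a different decomposition.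

-- ===== PORT A =====
def blobbing (A : List Int) (n : Int) : Int :=
  let s := (PySem.List.pyRange 0 (n - 1) 1).foldl
    (fun (s : Int × Int) i =>
      if PySem.List.pyGetD A (i + 1) 0 < PySem.List.pyGetD A i 0 then
        (s.1, s.2 + 1)
      else
        (s.1 + PySem.Int.floordiv ((s.2 - 1) * s.2) 2, 1)) (0, 1)
  if s.2 > 1 then s.1 + PySem.Int.floordiv ((s.2 - 1) * s.2) 2 else s.1

-- ===== PORT B =====
def blobbing_alt (A : List Int) (n : Int) : Int :=
  let pre := if n > 0 then PySem.List.slice A none (some n) else []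
  ((pre.zip (PySem.List.slice pre (some 1) none)).foldl
    (fun (s : Int × Int) pc =>
      let streak := if pc.2 < pc.1 then s.2 + 1 else 0
      (s.1 + streak, streak)) (0, 0)).1

-- ===== PRECONDITION & SPEC =====
-- Pre_ excludes exactly the inputs where Python A raises IndexError (the loop reads A[n-1],
-- so it raises when n ≥ 2 and n > len(A)).
def Pre_blobbing (A : List Int) (n : Int) : Prop := n ≤ A.length ∨ n ≤ 1
instance (A : List Int) (n : Int) : Decidable (Pre_blobbing A n) := by unfold Pre_blobbing; infer_instance
def pvWitness_blobbing : List Int × Int := ([3, 2, 1], 3)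
def Spec_blobbing (A : List Int) (n : Int) (out : Int) : Prop := out = blobbing_alt A n
instance (A : List Int) (n : Int) (out : Int) : Decidable (Spec_blobbing A n out) := by unfold Spec_blobbing; infer_instance

-- ===== CLAIM (what is proved, stated in full; the proofs are below) =====
def Claim_equal_blobbing : Prop := ∀ (A : List Int) (n : Int), Dom_blobbing A n → Pre_blobbing A n → Spec_blobbing A n (blobbing A n)

-- ===== LEMMAS AND PROOFS =====

-- (c-1)*c/2 + c = c*(c+1)/2 : the triangular-number step, exact because (c-1)*c is even.
theorem pv_tri_step (c : Int) :
    PySem.Int.floordiv (c * (c + 1)) 2 = PySem.Int.floordiv ((c - 1) * c) 2 + c := by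
  obtain ⟨m, hm⟩ := Int.even_mul_succ_self (c - 1)
  have h1 : (c - 1) * c = 2 * m := by nlinarith [hm]
  have h2 : c * (c + 1) = 2 * (m + c) := by nlinarith [hm]
  have e1 : PySem.Int.floordiv (2 * m) 2 = m := by
    rw [PySem.Int.floordiv_eq_iff_of_pos (by norm_num : (0:Int) < 2)]; omega
  have e2 : PySem.Int.floordiv (2 * (m + c)) 2 = m + c := by
    rw [PySem.Int.floordiv_eq_iff_of_pos (by norm_num : (0:Int) < 2)]; omega
  rw [h1, h2, e1, e2]

theorem pv_tri_one : PySem.Int.floordiv (((1:Int) - 1) * 1) 2 = 0 := by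
  rw [PySem.Int.floordiv_eq_iff_of_pos (by norm_num : (0:Int) < 2)]; omega

-- Fold invariant over an arbitrary list of adjacent pairs: A's flushed run-length state
-- relates to B's streak state by c = k + 1, rb = ra + C(c,2).
theorem pv_pairs_inv (l : List (Int × Int)) (ra c rb k : Int)
    (hc : c = k + 1) (h1 : 1 ≤ c)
    (hr : rb = ra + PySem.Int.floordiv ((c - 1) * c) 2) :
    (let s := l.foldl
        (fun (s : Int × Int) pc =>
          if pc.2 < pc.1 then (s.1, s.2 + 1)
          else (s.1 + PySem.Int.floordiv ((s.2 - 1) * s.2) 2, 1)) (ra, c)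
     if s.2 > 1 then s.1 + PySem.Int.floordiv ((s.2 - 1) * s.2) 2 else s.1)
    = (l.foldl
        (fun (s : Int × Int) pc =>
          let streak := if pc.2 < pc.1 then s.2 + 1 else 0
          (s.1 + streak, streak)) (rb, k)).1 := by
  induction l generalizing ra c rb k with
  | nil =>
    simp only [List.foldl]
    by_cases hgt : c > 1
    · simp [hgt, hr]
    · have hc1 : c = 1 := by omega
      subst hc1
      rw [if_neg (by omega)]
      have := pv_tri_one
      omega
  | cons p l ih =>
    simp only [List.foldl]
    by_cases hlt : p.2 < p.1
    · simp only [hlt, if_pos]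
      refine ih ra (c + 1) (rb + (k + 1)) (k + 1) (by omega) (by omega) ?_
      have ht := pv_tri_step c
      have hcc : (c + 1 - 1) * (c + 1) = c * (c + 1) := by ring
      rw [hcc, ht]; omega
    · simp only [hlt, if_false, add_zero]
      refine ih (ra + PySem.Int.floordiv ((c - 1) * c) 2) 1 rb 0 (by omega) (by omega) ?_
      rw [pv_tri_one]; omega

-- The index range A iterates over, mapped through (A[i], A[i+1]), IS the pairs list B folds:
-- zip of the m-prefix with its tail, for 1 ≤ m ≤ |xs|.
theorem pv_pairs_eq (xs : List Int) (m : Nat) (hm1 : 1 ≤ m) (hml : m ≤ xs.length) :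
    (PySem.List.pyRange 0 ((m : Int) - 1) 1).map
        (fun i => (PySem.List.pyGetD xs i 0, PySem.List.pyGetD xs (i + 1) 0))
      = (xs.take m).zip (xs.take m).tail := by
  apply List.ext_getElem
  · simp [PySem.List.length_pyRange_one, List.length_zip, List.length_take]
    omega
  · intro k hk hk'
    have hkm : k < m - 1 := by
      have := hk; simp [PySem.List.length_pyRange_one] at this; omega
    have hlen : k < (PySem.List.pyRange 0 ((m : Int) - 1) 1).length := by
      rw [PySem.List.length_pyRange_one]; omega
    have hidx : (PySem.List.pyRange 0 ((m : Int) - 1) 1)[k]'hlen = (k : Int) := by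
      rw [PySem.List.getElem_pyRange_one]; omega
    simp only [List.getElem_map, hidx, List.getElem_zip, List.getElem_tail,
      List.getElem_take]
    have e1 : PySem.List.pyGetD xs (k : Int) 0 = xs[k]'(by omega) :=
      PySem.List.pyGetD_ofNat xs k 0 (by omega)
    have e2 : PySem.List.pyGetD xs ((k : Int) + 1) 0 = xs[k + 1]'(by omega) := by
      have := PySem.List.pyGetD_ofNat xs (k + 1) 0 (by omega)
      push_cast at this ⊢
      exact this
    rw [e1, e2]

-- ===== VERDICT (by name: the statement is the Claim_ definition above) =====
theorem blobbing_spec : Claim_equal_blobbing := by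
  intro A n _ hpre
  unfold Spec_blobbing blobbing blobbing_alt
  by_cases hn2 : 2 ≤ n
  · have hnl : n ≤ A.length := by
      rcases hpre with h | h
      · exact h
      · omega
    have hpos : n > 0 := by omega
    have hnt : n = ((n.toNat : Nat) : Int) := by omega
    rw [if_pos hpos]
    rw [hnt, PySem.List.slice_to_natCast]
    simp only [PySem.List.slice_from_one]
    have key := pv_pairs_inv ((A.take n.toNat).zip (A.take n.toNat).tail)
      0 1 0 0 rfl (by omega) (by rw [pv_tri_one]; ring)
    have hA : (PySem.List.pyRange 0 ((n.toNat : Int) - 1) 1).foldl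
        (fun (s : Int × Int) i =>
          if PySem.List.pyGetD A (i + 1) 0 < PySem.List.pyGetD A i 0 then
            (s.1, s.2 + 1)
          else
            (s.1 + PySem.Int.floordiv ((s.2 - 1) * s.2) 2, 1)) (0, 1)
        = ((A.take n.toNat).zip (A.take n.toNat).tail).foldl
        (fun (s : Int × Int) pc =>
          if pc.2 < pc.1 then (s.1, s.2 + 1)
          else (s.1 + PySem.Int.floordiv ((s.2 - 1) * s.2) 2, 1)) (0, 1) := by
      rw [← pv_pairs_eq A n.toNat (by omega) (by omega), List.foldl_map]
    rw [hA]
    exact key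
  · -- n ≤ 1: A's range is empty, B's pairs list is empty; both give 0.
    have hrange : PySem.List.pyRange 0 (n - 1) 1 = [] :=
      PySem.List.pyRange_one_eq_nil (by omega)
    rw [hrange]
    simp only [List.foldl]
    rw [if_neg (by norm_num : ¬ (1:Int) > 1)]
    by_cases hp : n > 0
    · have hn1 : n = 1 := by omega
      subst hn1
      have : PySem.List.slice A none (some (1:Int)) = A.take 1 := by
        have := PySem.List.slice_to_natCast A 1
        exact_mod_cast this
      rw [if_pos hp, this]
      cases A with
      | nil => simp
      | cons a t =>
        simp [PySem.List.slice_from_one, List.take]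
    · rw [if_neg hp]
      simp
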